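-- pv_equiv track=rewrite | github.com/Twilight-Dream-Of-Magic/KolmogorovLike-DataCompressor | final/kolm_final.py | choose_rice_grid
-- ===== SOURCE A (Python) =====
-- from typing import List, Tuple, Dict, Optional, Callable
--
-- def cost_rice(vals: List[int], k: int) -> int:
--     """Estimate bit cost of Rice(k) encoding for non‑negative integers."""
--     c = 0
--     for x in vals:
--         q = x >> k
--         c += q + 1 + k
--     return c
--
-- def choose_rice_grid(vals: List[int], kmax: int = 6) -> Tuple[int, int]:
--     """Pick the Rice parameter yielding the fewest bits on a grid of k in [0..kmax].
--
--     Returns the selected ``k`` and the corresponding bit cost.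
--     """
--     if not vals:
--         return 0, 0
--     best_k = 0
--     best_c = cost_rice(vals, 0)
--     for k in range(1, kmax + 1):
--         c = cost_rice(vals, k)
--         if c < best_c:
--             best_c, best_k = c, k
--     return best_k, best_c
-- ===== SOURCE B (Python) =====
-- def choose_rice_grid(vals, kmax=6):
--     kk = max(kmax, 0)
--     ks = list(range(kk + 1))
--     costs = [0] * (kk + 1)
--     for x in vals:
--         costs = [c + (x >> k) + 1 + k for c, k in zip(costs, ks)]
--     return min(zip(ks, costs), key=lambda kc: kc[1])
-- ===== Notes on version B (the rewrite author's own statement) =====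
-- stated objective: alternative
-- what changed: A rescans vals once per candidate k (helper cost_rice called kmax+1 times, tracking a running best); B makes a single pass over vals maintaining the whole cost vector for all k at once, then selects the first index achieving the minimum.
import Mathlib
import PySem

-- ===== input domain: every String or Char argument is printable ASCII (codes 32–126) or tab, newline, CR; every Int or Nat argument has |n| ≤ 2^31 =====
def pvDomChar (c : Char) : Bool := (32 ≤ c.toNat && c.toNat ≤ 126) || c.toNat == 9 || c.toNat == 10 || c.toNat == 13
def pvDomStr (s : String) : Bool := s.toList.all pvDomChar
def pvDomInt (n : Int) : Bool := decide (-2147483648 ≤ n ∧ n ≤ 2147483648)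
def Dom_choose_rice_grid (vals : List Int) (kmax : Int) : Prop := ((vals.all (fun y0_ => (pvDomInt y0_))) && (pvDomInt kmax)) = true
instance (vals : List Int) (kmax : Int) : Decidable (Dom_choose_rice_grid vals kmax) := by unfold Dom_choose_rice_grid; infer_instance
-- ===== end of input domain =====

-- B replaces A's per-k rescans of vals (one cost_rice pass per candidate k, with a running
-- best) by a single pass over vals maintaining the whole cost vector at once, then a
-- first-minimum selection over (k, cost) pairs (objective: alternative decomposition).

-- Python's x >> k for k ≥ 0 (both ports use only nonnegative shift amounts): Lean's Int >>> Nat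
def pyShr (x k : Int) : Int := x >>> k.toNat

-- ===== PORT A =====
-- cost_rice(vals, k): c = 0; for x in vals: c += (x >> k) + 1 + k
def cost_rice (vals : List Int) (k : Int) : Int :=
  vals.foldl (fun c (x : Int) => c + (pyShr x k + 1 + k)) 0

def choose_rice_grid (vals : List Int) (kmax : Int) : Int × Int :=
  if vals = [] then (0, 0)
  else
    (PySem.List.pyRange 1 (kmax + 1) 1).foldl
      (fun b k =>
        let c := cost_rice vals k
        if c < b.2 then (k, c) else b)
      (0, cost_rice vals 0)

-- ===== PORT B =====
-- kk = max(kmax, 0); ks = list(range(kk+1)); costs = [0]*(kk+1);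
-- for x in vals: costs = [c + (x >> k) + 1 + k for c, k in zip(costs, ks)];
-- return min(zip(ks, costs), key=lambda kc: kc[1])   (.getD (0,0) only makes the port total:
-- zip(ks, costs) is never empty, so Python's min never raises)
def choose_rice_grid_alt (vals : List Int) (kmax : Int) : Int × Int :=
  let kk := max kmax 0
  let ks := PySem.List.pyRange 0 (kk + 1) 1
  let costs : List Int :=
    vals.foldl
      (fun cs (x : Int) => List.zipWith (fun c k => c + pyShr x k + 1 + k) cs ks)
      (List.replicate (kk + 1).toNat 0)
  (PySem.List.min? (List.zipWith (fun k c => (k, c)) ks costs) (fun kc => kc.2)).getD (0, 0)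

-- ===== PRECONDITION & SPEC =====
def Spec_choose_rice_grid (vals : List Int) (kmax : Int) (out : Int × Int) : Prop := out = choose_rice_grid_alt vals kmax
instance (vals : List Int) (kmax : Int) (out : Int × Int) : Decidable (Spec_choose_rice_grid vals kmax out) := by unfold Spec_choose_rice_grid; infer_instance

-- ===== CLAIM (what is proved, stated in full; the proofs are below) =====
def Claim_equal_choose_rice_grid : Prop := ∀ (vals : List Int) (kmax : Int), Dom_choose_rice_grid vals kmax → Spec_choose_rice_grid vals kmax (choose_rice_grid vals kmax)

-- ===== LEMMAS AND PROOFS =====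

-- cost_rice over a cons
lemma cost_rice_cons (x : Int) (vals : List Int) (k : Int) :
    cost_rice (x :: vals) k = (pyShr x k + 1 + k) + cost_rice vals k := by
  simp only [cost_rice, List.foldl_cons, PySem.List.foldl_add]
  ring

-- Python's min on a nonempty list is the running first-minimum fold
lemma min?_pair_cons (key : Int × Int → Int) :
    ∀ (xs : List (Int × Int)) (x : Int × Int),
      PySem.List.min? (x :: xs) key
        = some (xs.foldl (fun m y => if key y < key m then y else m) x) := by
  intro xs
  induction xs with
  | nil => intro x; rfl
  | cons y ys ih =>
      intro x
      have h1 : PySem.List.min? (x :: y :: ys) key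
          = PySem.List.min? ((if key y < key x then y else x) :: ys) key := by
        by_cases h : key y < key x
        · simp only [PySem.List.min?, List.foldl_cons, if_pos h]
        · simp only [PySem.List.min?, List.foldl_cons, if_neg h]
      rw [h1, ih, List.foldl_cons]

-- B's cost vector, indexwise: the fold over vals adds cost_rice vals i at index i
lemma costs_fold (vals : List Int) (kk : Int) :
    ∀ cs : List Int, cs.length = (kk + 1).toNat →
      ((vals.foldl
          (fun cs (x : Int) =>
            List.zipWith (fun c k => c + pyShr x k + 1 + k) cs (PySem.List.pyRange 0 (kk + 1) 1))
          cs).length = (kk + 1).toNat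
      ∧ ∀ i : Nat, i < (kk + 1).toNat →
          (vals.foldl
              (fun cs (x : Int) =>
                List.zipWith (fun c k => c + pyShr x k + 1 + k) cs (PySem.List.pyRange 0 (kk + 1) 1))
              cs)[i]?
            = cs[i]?.map (fun c => c + cost_rice vals (i : Int))) := by
  have hlen_ks : (PySem.List.pyRange 0 (kk + 1) 1).length = (kk + 1).toNat := by
    rw [PySem.List.length_pyRange_one]; omega
  induction vals with
  | nil =>
      intro cs h
      refine ⟨h, fun i hi => ?_⟩
      simp only [List.foldl_nil, cost_rice, List.foldl_nil, Int.add_zero]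
      cases cs[i]? <;> rfl
  | cons x vals ih =>
      intro cs h
      have hstep_len :
          (List.zipWith (fun c k => c + pyShr x k + 1 + k) cs (PySem.List.pyRange 0 (kk + 1) 1)).length
            = (kk + 1).toNat := by
        simp [List.length_zipWith, h, hlen_ks]
      obtain ⟨hl, hidx⟩ := ih _ hstep_len
      refine ⟨by simpa [List.foldl_cons] using hl, fun i hi => ?_⟩
      rw [List.foldl_cons, hidx i hi]
      have h1 : i < cs.length := by omega
      have h2 : i < (PySem.List.pyRange 0 (kk + 1) 1).length := by omega
      rw [List.getElem?_zipWith]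
      rw [List.getElem?_eq_getElem h1, List.getElem?_eq_getElem h2]
      have hks : (PySem.List.pyRange 0 (kk + 1) 1)[i] = (0 : Int) + i :=
        PySem.List.getElem_pyRange_one 0 (kk + 1) i h2
      rw [hks]
      simp only [Option.map_some, cost_rice_cons, Int.zero_add]
      congr 1
      ring

-- with vals = [] every cost is 0, so the first-minimum fold never moves off its start
lemma foldl_min_stay (c : Int → Int) (hc : ∀ k, c k = 0) :
    ∀ (l : List Int) (b : Int),
      l.foldl (fun (m : Int × Int) k => if c k < m.2 then (k, c k) else m) (b, 0) = (b, 0) := by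
  intro l
  induction l with
  | nil => intro b; rfl
  | cons k ks ih =>
      intro b
      rw [List.foldl_cons, if_neg (by rw [hc k]; exact lt_irrefl 0)]
      exact ih b

theorem choose_rice_grid_equal : ∀ (vals : List Int) (kmax : Int),
    choose_rice_grid vals kmax = choose_rice_grid_alt vals kmax := by
  intro vals kmax
  set kk : Int := max kmax 0 with hkk
  have hkk0 : (0 : Int) ≤ kk := le_max_right _ _
  have hrange : PySem.List.pyRange 1 (kmax + 1) 1 = PySem.List.pyRange 1 (kk + 1) 1 := by
    by_cases h : 0 ≤ kmax
    · have : kk = kmax := by omega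
      rw [this]
    · rw [PySem.List.pyRange_one_eq_nil (by omega), PySem.List.pyRange_one_eq_nil (by omega)]
  have halt : choose_rice_grid_alt vals kmax
      = (PySem.List.min?
          (List.zipWith (fun k c => (k, c)) (PySem.List.pyRange 0 (kk + 1) 1)
            (vals.foldl
              (fun cs (x : Int) =>
                List.zipWith (fun c k => c + pyShr x k + 1 + k) cs (PySem.List.pyRange 0 (kk + 1) 1))
              (List.replicate (kk + 1).toNat (0 : Int))))
          (fun kc => kc.2)).getD (0, 0) := rfl
  have ha : choose_rice_grid vals kmax
      = if vals = [] then (0, 0)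
        else
          (PySem.List.pyRange 1 (kmax + 1) 1).foldl
            (fun b k => let c := cost_rice vals k; if c < b.2 then (k, c) else b)
            (0, cost_rice vals 0) := rfl
  have hlen_ks : (PySem.List.pyRange 0 (kk + 1) 1).length = (kk + 1).toNat := by
    rw [PySem.List.length_pyRange_one]; omega
  obtain ⟨hclen, hcidx⟩ :=
    costs_fold vals kk (List.replicate (kk + 1).toNat (0 : Int)) (by simp)
  have hc : ∀ i : Nat, i < (kk + 1).toNat →
      (vals.foldl
          (fun cs (x : Int) =>
            List.zipWith (fun c k => c + pyShr x k + 1 + k) cs (PySem.List.pyRange 0 (kk + 1) 1))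
          (List.replicate (kk + 1).toNat (0 : Int)))[i]?
        = some (cost_rice vals (i : Int)) := by
    intro i hi
    rw [hcidx i hi, List.getElem?_replicate, if_pos hi]
    simp
  -- the (k, cost) pairs are exactly the cost function tabulated on 0..kk
  have hP : List.zipWith (fun k c => (k, c)) (PySem.List.pyRange 0 (kk + 1) 1)
        (vals.foldl
          (fun cs (x : Int) =>
            List.zipWith (fun c k => c + pyShr x k + 1 + k) cs (PySem.List.pyRange 0 (kk + 1) 1))
          (List.replicate (kk + 1).toNat (0 : Int)))
      = (PySem.List.pyRange 0 (kk + 1) 1).map (fun k => (k, cost_rice vals k)) := by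
    apply List.ext_getElem?
    intro i
    rw [List.getElem?_zipWith, List.getElem?_map]
    by_cases hi : i < (kk + 1).toNat
    · have h2 : i < (PySem.List.pyRange 0 (kk + 1) 1).length := by omega
      rw [List.getElem?_eq_getElem h2, hc i hi,
        PySem.List.getElem_pyRange_one 0 (kk + 1) i h2]
      simp
    · rw [List.getElem?_eq_none (by omega), List.getElem?_eq_none (by omega)]
      rfl
  have hcons : PySem.List.pyRange 0 (kk + 1) 1 = 0 :: PySem.List.pyRange 1 (kk + 1) 1 :=
    PySem.List.pyRange_one_cons (by omega)
  rw [ha, halt, hP, hcons, List.map_cons, min?_pair_cons, List.foldl_map, Option.getD_some]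
  by_cases hv : vals = []
  · subst hv
    rw [if_pos rfl]
    show (0, 0)
      = (PySem.List.pyRange 1 (kk + 1) 1).foldl
          (fun (m : Int × Int) k =>
            if cost_rice [] k < m.2 then (k, cost_rice [] k) else m)
          ((0 : Int), (0 : Int))
    exact (foldl_min_stay (cost_rice []) (fun _ => rfl) _ 0).symm
  · rw [if_neg hv, hrange]

-- ===== VERDICT (by name: the statement is the Claim_ definition above) =====
theorem choose_rice_grid_spec : Claim_equal_choose_rice_grid := by
  intro vals kmax _
  unfold Spec_choose_rice_grid
  exact choose_rice_grid_equal vals kmax
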